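-- pv_equiv track=rewrite | github.com/sanket29/RAG24-BE | rag_model/context_aware_response.py | _are_topics_related
-- ===== SOURCE A (Python) =====
-- from typing import List, Dict, Any, Optional, Tuple
--
-- def _are_topics_related(topics1: List[str], topics2: List[str]) -> bool:
--     """Check if two sets of topics are conceptually related"""
--
--     # Define related topic groups
--     related_groups = [
--         {"technical", "system", "data"},
--         {"business", "support"},
--         {"general"}  # General can relate to anything
--     ]
--
--     # Check if topics fall within the same related group
--     for group in related_groups:
--         if (any(topic in group for topic in topics1) and
--             any(topic in group for topic in topics2)):
--             return True
--
--     return False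
-- ===== SOURCE B (Python) =====
-- def _are_topics_related(topics1, topics2):
--     """Check if two sets of topics are conceptually related"""
--     related_groups = [
--         {"technical", "system", "data"},
--         {"business", "support"},
--         {"general"}  # General can relate to anything
--     ]
--     # Index every topic by its group id once, then a single pass over each list.
--     group_map = {}
--     for gid, group in enumerate(related_groups):
--         for topic in group:
--             group_map[topic] = gid
--     groups1 = {group_map[t] for t in topics1 if t in group_map}
--     return any(t in group_map and group_map[t] in groups1 for t in topics2)
-- ===== Notes on version B (the rewrite author's own statement) =====
-- stated objective: alternative
-- what changed: Instead of scanning every related group against both lists with nested any-loops, B builds a topic->group-id dict once, collects topics1's group ids into a set in one pass, and makes a single pass over topics2 looking for a shared id.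
import Mathlib
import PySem

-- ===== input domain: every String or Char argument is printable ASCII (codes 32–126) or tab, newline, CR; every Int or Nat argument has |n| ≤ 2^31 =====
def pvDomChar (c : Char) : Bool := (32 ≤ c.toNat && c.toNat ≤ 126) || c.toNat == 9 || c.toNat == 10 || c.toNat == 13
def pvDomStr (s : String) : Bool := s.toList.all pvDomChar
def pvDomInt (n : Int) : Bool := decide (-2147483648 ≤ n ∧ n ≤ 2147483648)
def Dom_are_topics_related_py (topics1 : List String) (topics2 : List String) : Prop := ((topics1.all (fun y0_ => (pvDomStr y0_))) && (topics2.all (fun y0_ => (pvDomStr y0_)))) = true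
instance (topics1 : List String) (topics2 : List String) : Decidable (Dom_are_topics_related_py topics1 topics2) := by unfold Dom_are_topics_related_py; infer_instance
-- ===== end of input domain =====

-- B replaces A's per-group double-any scan by a topic->group-id dict built once,
-- a set of topics1's group ids, and one pass over topics2 (objective: alternative decomposition).

-- ===== PORT A =====
def are_topics_related_py (topics1 : List String) (topics2 : List String) : Bool :=
  let related_groups : List (PySem.Set String) :=
    [PySem.Set.ofList ["technical", "system", "data"],
     PySem.Set.ofList ["business", "support"],
     PySem.Set.ofList ["general"]]
  -- for group in related_groups: if any(...) and any(...): return True / return False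
  related_groups.any (fun group =>
    topics1.any (fun topic => PySem.Set.contains group topic) &&
    topics2.any (fun topic => PySem.Set.contains group topic))

-- ===== PORT B =====
def are_topics_related_py_alt (topics1 : List String) (topics2 : List String) : Bool :=
  let related_groups : List (PySem.Set String) :=
    [PySem.Set.ofList ["technical", "system", "data"],
     PySem.Set.ofList ["business", "support"],
     PySem.Set.ofList ["general"]]
  let group_map : PySem.Dict String Int :=
    (PySem.List.enumerate related_groups).foldl
      (fun d p => p.2.foldl (fun d topic => d.insert topic p.1) d) PySem.Dict.empty
  let groups1 : PySem.Set Int :=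
    topics1.foldl (fun s t =>
      match group_map.get? t with
      | some g => PySem.Set.add s g
      | none => s) PySem.Set.empty
  topics2.any (fun t =>
    match group_map.get? t with
    | some g => PySem.Set.contains groups1 g
    | none => false)

-- ===== PRECONDITION & SPEC =====
def Spec_are_topics_related_py (topics1 : List String) (topics2 : List String) (out : Bool) : Prop := out = are_topics_related_py_alt topics1 topics2
instance (topics1 : List String) (topics2 : List String) (out : Bool) : Decidable (Spec_are_topics_related_py topics1 topics2 out) := by unfold Spec_are_topics_related_py; infer_instance

-- ===== CLAIM (what is proved, stated in full; the proofs are below) =====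
def Claim_equal_are_topics_related_py : Prop := ∀ (topics1 : List String) (topics2 : List String), Dom_are_topics_related_py topics1 topics2 → Spec_are_topics_related_py topics1 topics2 (are_topics_related_py topics1 topics2)

-- ===== LEMMAS AND PROOFS =====

-- The concrete lookup table B builds.
def pvGM : PySem.Dict String Int :=
  PySem.Dict.mk [("technical", 0), ("system", 0), ("data", 0),
                 ("business", 1), ("support", 1), ("general", 2)]

theorem pvGM_reduce :
    (PySem.List.enumerate
        [PySem.Set.ofList ["technical", "system", "data"],
         PySem.Set.ofList ["business", "support"],
         PySem.Set.ofList ["general"]]).foldl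
      (fun (d : PySem.Dict String Int) p => p.2.foldl (fun d topic => d.insert topic p.1) d)
      PySem.Dict.empty = pvGM := by decide

theorem pvGM_get (t : String) :
    pvGM.get? t =
      if t = "technical" then some 0 else if t = "system" then some 0
      else if t = "data" then some 0 else if t = "business" then some 1
      else if t = "support" then some 1 else if t = "general" then some 2
      else none := by
  by_cases h1 : t = "technical" <;> by_cases h2 : t = "system" <;>
    by_cases h3 : t = "data" <;> by_cases h4 : t = "business" <;>
    by_cases h5 : t = "support" <;> by_cases h6 : t = "general" <;>
    simp_all [pvGM, PySem.Dict.get?] <;>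
      exact ⟨Ne.symm h1, Ne.symm h2, Ne.symm h3, Ne.symm h4, Ne.symm h5, Ne.symm h6⟩

theorem pvGM_mem0 (t : String) :
    PySem.Set.contains (PySem.Set.ofList ["technical", "system", "data"]) t
      = (pvGM.get? t == some (0 : Int)) := by
  rw [pvGM_get]
  by_cases h1 : t = "technical" <;> by_cases h2 : t = "system" <;>
    by_cases h3 : t = "data" <;> by_cases h4 : t = "business" <;>
    by_cases h5 : t = "support" <;> by_cases h6 : t = "general" <;>
    simp_all [PySem.Set.contains, PySem.Set.ofList]

theorem pvGM_mem1 (t : String) :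
    PySem.Set.contains (PySem.Set.ofList ["business", "support"]) t
      = (pvGM.get? t == some (1 : Int)) := by
  rw [pvGM_get]
  by_cases h1 : t = "technical" <;> by_cases h2 : t = "system" <;>
    by_cases h3 : t = "data" <;> by_cases h4 : t = "business" <;>
    by_cases h5 : t = "support" <;> by_cases h6 : t = "general" <;>
    simp_all [PySem.Set.contains, PySem.Set.ofList]

theorem pvGM_mem2 (t : String) :
    PySem.Set.contains (PySem.Set.ofList ["general"]) t
      = (pvGM.get? t == some (2 : Int)) := by
  rw [pvGM_get]
  by_cases h1 : t = "technical" <;> by_cases h2 : t = "system" <;>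
    by_cases h3 : t = "data" <;> by_cases h4 : t = "business" <;>
    by_cases h5 : t = "support" <;> by_cases h6 : t = "general" <;>
    simp_all [PySem.Set.contains, PySem.Set.ofList]

theorem pvGM_range {t : String} {g : Int} (h : pvGM.get? t = some g) :
    g = 0 ∨ g = 1 ∨ g = 2 := by
  rw [pvGM_get t] at h
  split_ifs at h <;> simp_all

-- groups1 accumulator characterization
theorem pv_groups1_contains (l : List String) (s : PySem.Set Int) (i : Int) :
    PySem.Set.contains
      (l.foldl (fun s t =>
        match pvGM.get? t with
        | some g => PySem.Set.add s g
        | none => s) s) i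
      = (PySem.Set.contains s i || l.any (fun t => pvGM.get? t == some i)) := by
  induction l generalizing s with
  | nil => simp
  | cons x xs ih =>
    simp only [List.foldl_cons, List.any_cons, ih]
    cases hx : pvGM.get? x with
    | none => simp
    | some g =>
      rw [Bool.eq_iff_iff]
      simp only [Bool.or_eq_true, PySem.Set.contains, PySem.Set.add, beq_iff_eq,
        Option.some.injEq]
      by_cases hg : g ∈ s <;> by_cases hgi : g = i <;>
        simp [hg, hgi] <;> aesop

-- ===== VERDICT (by name: the statement is the Claim_ definition above) =====
theorem are_topics_related_py_spec : Claim_equal_are_topics_related_py := by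
  intro topics1 topics2 _
  unfold Spec_are_topics_related_py are_topics_related_py are_topics_related_py_alt
  simp only [pvGM_reduce]
  simp only [pv_groups1_contains]
  simp only [pvGM_mem0, pvGM_mem1, pvGM_mem2, List.any_cons, List.any_nil, Bool.or_false]
  rw [Bool.eq_iff_iff]
  simp only [Bool.or_eq_true, Bool.and_eq_true, List.any_eq_true]
  constructor
  · rintro (⟨⟨t1, h1, m1⟩, ⟨t2, h2, m2⟩⟩ | ⟨⟨t1, h1, m1⟩, ⟨t2, h2, m2⟩⟩ | ⟨⟨t1, h1, m1⟩, ⟨t2, h2, m2⟩⟩) <;>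
    · simp only [beq_iff_eq] at m1 m2
      refine ⟨t2, h2, ?_⟩
      rw [m2]
      simp only [PySem.Set.empty, PySem.Set.contains, List.contains_nil, Bool.false_or,
        List.any_eq_true, beq_iff_eq]
      exact ⟨t1, h1, m1⟩
  · rintro ⟨t2, h2, hm⟩
    cases hg : pvGM.get? t2 with
    | none => rw [hg] at hm; simp at hm
    | some g =>
      rw [hg] at hm
      simp only [PySem.Set.empty, PySem.Set.contains, List.contains_nil, Bool.false_or,
        List.any_eq_true, beq_iff_eq] at hm
      obtain ⟨t1, h1, m1⟩ := hm
      rcases pvGM_range hg with rfl | rfl | rfl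
      · exact Or.inl ⟨⟨t1, h1, by simp [m1]⟩, ⟨t2, h2, by simp [hg]⟩⟩
      · exact Or.inr (Or.inl ⟨⟨t1, h1, by simp [m1]⟩, ⟨t2, h2, by simp [hg]⟩⟩)
      · exact Or.inr (Or.inr ⟨⟨t1, h1, by simp [m1]⟩, ⟨t2, h2, by simp [hg]⟩⟩)
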